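-- pv_equiv track=rewrite | github.com/btpozolo/PY110 | Problems/easy1.py | signed_integer_to_string
-- ===== SOURCE A (Python) =====
-- def signed_integer_to_string(integer):
--     string = ""
--     nums = {
--         0: '0',
--         1: '1',
--         2: '2',
--         3: '3',
--         4: '4',
--         5: '5',
--         6: '6',
--         7: '7',
--         8: '8',
--         9: '9',
--     }
--     unsigned_int = abs(integer)
--
--     while unsigned_int / 10 > 0:
--         last_value = unsigned_int % 10
--         string = nums[last_value] + string
--         unsigned_int = unsigned_int // 10
--
--     if integer < 0:
--         unsigned_int *= -1
--         string = '-' + string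
--     elif integer > 0:
--         string = '+' + string
--
--     return string or '0'
-- ===== SOURCE B (Python) =====
-- def signed_integer_to_string(integer):
--     if integer == 0:
--         return '0'
--     sign = '+' if integer > 0 else '-'
--     return sign + str(abs(integer))
-- ===== Notes on version B (the rewrite author's own statement) =====
-- stated objective: simpler
-- what changed: Replaced the manual digit-extraction while-loop with its digit-to-char dict by a zero special case plus sign character concatenated with the builtin str(abs(integer)) conversion.
import Mathlib
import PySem

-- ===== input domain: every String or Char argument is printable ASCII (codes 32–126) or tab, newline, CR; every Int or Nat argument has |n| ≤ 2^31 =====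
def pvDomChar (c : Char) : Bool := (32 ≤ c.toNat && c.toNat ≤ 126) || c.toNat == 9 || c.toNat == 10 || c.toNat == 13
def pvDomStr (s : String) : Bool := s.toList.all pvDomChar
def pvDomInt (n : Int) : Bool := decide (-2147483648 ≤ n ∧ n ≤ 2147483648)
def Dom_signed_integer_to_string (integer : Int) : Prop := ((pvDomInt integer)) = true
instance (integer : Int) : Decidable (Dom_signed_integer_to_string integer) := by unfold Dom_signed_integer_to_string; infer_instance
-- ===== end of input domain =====

-- B replaces A's manual digit-extraction loop with dict lookup by a zero case plus sign + str(abs(n)) (simpler; not faster).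


-- ===== PORT A =====
-- the `nums` dict of A (digit value -> digit character)
def pvNumsA : PySem.Dict Int String :=
  PySem.Dict.ofList [(0, "0"), (1, "1"), (2, "2"), (3, "3"), (4, "4"),
                     (5, "5"), (6, "6"), (7, "7"), (8, "8"), (9, "9")]

-- A's while loop; `unsigned_int / 10 > 0` (true division) holds exactly while unsigned_int ≠ 0.
-- `nums[last_value]` always hits the dict (keys 0..9), so `.getD "" ` is exact here.
def pvLoopA (u : Nat) (s : String) : String :=
  if h : u = 0 then s -- while guard: u / 10 > 0 (true division) iff u ≠ 0
  else pvLoopA (u / 10) (pvNumsA.getD ((u : Int) % 10) "" ++ s)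
decreasing_by exact Nat.div_lt_self (Nat.pos_of_ne_zero h) (by omega)

def signed_integer_to_string (integer : Int) : String :=
  let string := pvLoopA integer.natAbs ""
  let string := if integer < 0 then "-" ++ string
                else if integer > 0 then "+" ++ string
                else string
  if string = "" then "0" else string

-- ===== PORT B =====
def signed_integer_to_string_alt (integer : Int) : String :=
  if integer = 0 then "0"
  else (if integer > 0 then "+" else "-") ++ PySem.Int.toStr |integer|

-- ===== PRECONDITION & SPEC =====
def Spec_signed_integer_to_string (integer : Int) (out : String) : Prop := out = signed_integer_to_string_alt integer
instance (integer : Int) (out : String) : Decidable (Spec_signed_integer_to_string integer out) := by unfold Spec_signed_integer_to_string; infer_instance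

-- ===== CLAIM (what is proved, stated in full; the proofs are below) =====
def Claim_equal_signed_integer_to_string : Prop := ∀ (integer : Int), Dom_signed_integer_to_string integer → Spec_signed_integer_to_string integer (signed_integer_to_string integer)

-- ===== LEMMAS AND PROOFS =====

-- toDigitsCore with enough fuel equals toDigits with the accumulator appended
lemma pv_toDigitsCore_eq (n : Nat) : ∀ (f : Nat) (acc : List Char), n < f →
    Nat.toDigitsCore 10 f n acc = Nat.toDigits 10 n ++ acc := by
  induction n using Nat.strong_induction_on with
  | _ n ih =>
    intro f acc hf
    obtain ⟨g, rfl⟩ : ∃ g, f = g + 1 := ⟨f - 1, by omega⟩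
    rw [Nat.toDigitsCore]
    by_cases h0 : n / 10 = 0
    · simp only [h0, if_pos]
      rw [Nat.toDigits, Nat.toDigitsCore]
      simp [h0]
    · have hlt : n / 10 < n := by omega
      have hr : Nat.toDigits 10 n ++ acc
          = (Nat.toDigits 10 (n / 10) ++ [(n % 10).digitChar]) ++ acc := by
        rw [Nat.toDigits, Nat.toDigitsCore, if_neg h0,
          ih (n / 10) hlt n [(n % 10).digitChar] (by omega)]
      rw [if_neg h0, ih (n / 10) hlt g _ (by omega), hr]
      simp

-- the dict lookup is the digit character
lemma pv_nums_getD (u : Nat) :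
    pvNumsA.getD ((u : Int) % 10) "" = String.ofList [(u % 10).digitChar] := by
  have h10 : u % 10 < 10 := Nat.mod_lt _ (by omega)
  have hc : ((u : Int) % 10) = ((u % 10 : Nat) : Int) := by
    omega
  rw [hc]
  interval_cases h : u % 10 <;> decide

-- characterisation of A's loop
lemma pv_loopA_eq (u : Nat) : ∀ (s : String), 0 < u →
    pvLoopA u s = String.ofList (Nat.toDigits 10 u) ++ s := by
  induction u using Nat.strong_induction_on with
  | _ u ih =>
    intro s hu
    rw [pvLoopA, dif_neg (by omega), pv_nums_getD]
    by_cases h0 : u / 10 = 0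
    · rw [h0, pvLoopA, dif_pos rfl]
      have hr : Nat.toDigits 10 u = [(u % 10).digitChar] := by
        rw [Nat.toDigits, Nat.toDigitsCore, if_pos h0]
      rw [hr]
    · have hlt : u / 10 < u := by omega
      have hr : Nat.toDigits 10 u
          = Nat.toDigits 10 (u / 10) ++ [(u % 10).digitChar] := by
        rw [Nat.toDigits, Nat.toDigitsCore, if_neg h0]
        exact pv_toDigitsCore_eq (u / 10) u [(u % 10).digitChar] (by omega)
      rw [ih (u / 10) hlt _ (Nat.pos_of_ne_zero h0), hr]
      simp [String.append_assoc]

lemma pv_toStr_natAbs (n : Int) :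
    PySem.Int.toStr |n| = String.ofList (Nat.toDigits 10 n.natAbs) := by
  rw [PySem.Int.toStr, PySem.Int.toChars, Int.abs_eq_natAbs, if_neg (by omega), Int.toNat_natCast]

-- ===== VERDICT (by name: the statement is the Claim_ definition above) =====
theorem signed_integer_to_string_spec : Claim_equal_signed_integer_to_string := by
  intro n _
  unfold Spec_signed_integer_to_string signed_integer_to_string signed_integer_to_string_alt
  dsimp only
  by_cases h0 : n = 0
  · subst h0
    rw [pvLoopA]
    simp
  · have hpos : 0 < n.natAbs := by omega
    rw [pv_loopA_eq n.natAbs "" hpos, pv_toStr_natAbs]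
    rcases lt_trichotomy n 0 with h | h | h
    · rw [if_pos h, if_neg h0, if_neg (by omega : ¬ n > 0)]
      simp
    · omega
    · rw [if_neg (by omega : ¬ n < 0), if_pos h, if_neg h0, if_pos h]
      simp
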